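-- pv_equiv track=rewrite | github.com/Schnouki/advent-of-code | day21/day21.py | fractal_iteration
-- ===== SOURCE A (Python) =====
-- import itertools as it
-- import typing
--
-- Grid = typing.List[typing.List[str]]
--
-- Rules = typing.Dict[str, str]
--
-- def pattern_to_grid(pattern: str) -> Grid:
--     """Convert a pattern description to a grid.
--
--     >>> pattern_to_grid('../.#')
--     [['.', '.'], ['.', '#']]
--     """
--     return [list(line) for line in pattern.split("/")]
--
-- def grid_to_pattern(grid: Grid) -> str:
--     """Convert a grid to a pattern.
--
--     >>> grid_to_pattern([['.', '.'], ['.', '#']])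
--     '../.#'
--     """
--     return "/".join(["".join(line) for line in grid])
--
-- def fractal_iteration(grid: Grid, rules: Rules) -> Grid:
--     """Perform a single iteration of the fractal art process.
--
--     >>> grid_to_pattern(fractal_iteration(START_GRID, parse_rules(TEST_RULES)))
--     '#..#/..../..../#..#'
--     """
--     size = len(grid)
--
--     if size % 2 == 0:
--         sqsz = 2
--     elif size % 3 == 0:
--         sqsz = 3
--     else:
--         return grid
--
--     # Split in squares
--     new_sqsz = sqsz + 1
--     new_size = (size // sqsz) * new_sqsz
--     new_grid = [[''] * new_size for _ in range(new_size)]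
--     for x, y in it.product(range(size // sqsz), repeat=2):
--         square = [[''] * sqsz for _ in range(sqsz)]
--         for xx, yy in it.product(range(sqsz), repeat=2):
--             square[yy][xx] = grid[y * sqsz + yy][x * sqsz + xx]
--
--         patt = grid_to_pattern(square)
--         new_square = pattern_to_grid(rules[patt])
--         for xx, yy in it.product(range(new_sqsz), repeat=2):
--             new_grid[y * new_sqsz + yy][x * new_sqsz + xx] = new_square[yy][xx]
--
--     return new_grid
-- ===== SOURCE B (Python) =====
-- def fractal_iteration(grid, rules):
--     """Perform a single iteration of the fractal art process.
--
--     Band-based rewrite: instead of a preallocated output grid filled block by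
--     block via nested per-cell index loops, process the grid in horizontal
--     bands of sqsz rows, build each block's pattern directly from row slices,
--     and append the assembled output rows band by band.
--     """
--     size = len(grid)
--
--     if size % 2 == 0:
--         sqsz = 2
--     elif size % 3 == 0:
--         sqsz = 3
--     else:
--         return grid
--
--     nblocks = size // sqsz
--     new_grid = []
--     for by in range(nblocks):
--         rows = grid[by * sqsz:(by + 1) * sqsz]
--         blocks = []
--         for bx in range(nblocks):
--             patt = "/".join("".join(row[bx * sqsz:(bx + 1) * sqsz]) for row in rows)
--             blocks.append(rules[patt].split("/"))
--         for r in range(sqsz + 1):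
--             new_grid.append([ch for blk in blocks for ch in blk[r]])
--     return new_grid
-- ===== Notes on version B (the rewrite author's own statement) =====
-- stated objective: simpler
-- what changed: Replaces the preallocated output grid filled per-cell through nested itertools.product index loops (building an intermediate square grid per block) with a band decomposition: slice each horizontal band of sqsz rows, form each block's pattern directly by joining row slices, and append the assembled output rows band by band with no index arithmetic or mutation.
import Mathlib
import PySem

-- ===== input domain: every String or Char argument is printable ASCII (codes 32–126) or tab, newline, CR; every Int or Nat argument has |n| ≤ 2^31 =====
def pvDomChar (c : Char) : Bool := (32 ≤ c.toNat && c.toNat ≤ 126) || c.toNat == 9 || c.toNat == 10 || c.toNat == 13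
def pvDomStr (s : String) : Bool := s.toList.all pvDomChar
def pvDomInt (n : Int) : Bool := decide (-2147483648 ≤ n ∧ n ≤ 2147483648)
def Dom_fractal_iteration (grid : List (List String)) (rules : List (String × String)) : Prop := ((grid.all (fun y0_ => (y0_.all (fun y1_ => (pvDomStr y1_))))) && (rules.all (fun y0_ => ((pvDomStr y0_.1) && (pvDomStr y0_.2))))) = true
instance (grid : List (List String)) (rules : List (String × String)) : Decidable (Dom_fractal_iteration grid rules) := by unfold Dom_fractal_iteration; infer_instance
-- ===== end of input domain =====

-- B re-implements one fractal-art expansion step by horizontal bands of row slices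
-- (append-only assembly) instead of A's preallocated grid filled cell-by-cell through
-- nested itertools.product index loops; equal output on Pre_, same asymptotic cost.


-- dict lookup rules[patt]: first match in the association list (Python dict keys are unique);
-- none = KeyError, excluded by Pre_ (both ports then read the default "").
def pvLookup (rules : List (String × String)) (k : String) : Option String :=
  (rules.find? (fun p => p.1 == k)).map Prod.snd

-- ===== PORT A =====

-- [list(line) for line in pattern.split("/")] — cells are 1-char strings
def pattern_to_grid (pattern : String) : List (List String) :=
  ((PySem.Str.split? pattern "/").getD []).map (fun line => line.toList.map (fun c => String.ofList [c]))

-- "/".join(["".join(line) for line in grid])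
def grid_to_pattern (grid : List (List String)) : String :=
  PySem.Str.join "/" (grid.map (fun line => PySem.Str.join "" line))

-- g[i][j] = v (Python raises IndexError out of range; that is excluded by Pre_, here a no-op)
def pvSetCell (g : List (List String)) (i j : Nat) (v : String) : List (List String) :=
  g.set i ((g.getD i []).set j v)

-- itertools.product(range(k), repeat=2), first component outermost
def pvProduct2 (k : Nat) : List (Nat × Nat) :=
  (List.range k).flatMap (fun a => (List.range k).map (fun b => (a, b)))

-- the body shared by the size%2 / size%3 branches of A (sqsz = 2 or 3);
-- grid[..][..] reads use getD: Python's IndexError/KeyError inputs are excluded by Pre_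
def pvACore (grid : List (List String)) (rules : List (String × String)) (sqsz : Nat) :
    List (List String) :=
  let size := grid.length
  let new_sqsz := sqsz + 1
  let new_size := (size / sqsz) * new_sqsz
  (pvProduct2 (size / sqsz)).foldl (fun new_grid xy =>
    let square := (pvProduct2 sqsz).foldl (fun sq p =>
        pvSetCell sq p.2 p.1 ((grid.getD (xy.2 * sqsz + p.2) []).getD (xy.1 * sqsz + p.1) ""))
      (List.replicate sqsz (List.replicate sqsz ""))
    let new_square := pattern_to_grid ((pvLookup rules (grid_to_pattern square)).getD "")
    (pvProduct2 new_sqsz).foldl (fun ng p =>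
        pvSetCell ng (xy.2 * new_sqsz + p.2) (xy.1 * new_sqsz + p.1)
          ((new_square.getD p.2 []).getD p.1 "")) new_grid)
    (List.replicate new_size (List.replicate new_size ""))

def fractal_iteration (grid : List (List String)) (rules : List (String × String)) :
    List (List String) :=
  if grid.length % 2 = 0 then pvACore grid rules 2
  else if grid.length % 3 = 0 then pvACore grid rules 3
  else grid

-- ===== PORT B =====

-- the body shared by the size%2 / size%3 branches of B: horizontal bands of sqsz rows,
-- block patterns from row slices, output rows appended band by band
def pvBCore (grid : List (List String)) (rules : List (String × String)) (sqsz : Nat) :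
    List (List String) :=
  let size := grid.length
  let nblocks := size / sqsz
  (List.range nblocks).foldl (fun new_grid by_ =>
    let rows := (grid.drop (by_ * sqsz)).take sqsz          -- grid[by*sqsz:(by+1)*sqsz]
    let blocks := (List.range nblocks).map (fun bx =>
      (PySem.Str.split? ((pvLookup rules
        (PySem.Str.join "/" (rows.map (fun row =>
          PySem.Str.join "" ((row.drop (bx * sqsz)).take sqsz))))).getD "") "/").getD [])
    (List.range (sqsz + 1)).foldl (fun ng r =>
      ng ++ [blocks.flatMap (fun blk => (blk.getD r "").toList.map (fun c => String.ofList [c]))])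
      new_grid) []

def fractal_iteration_alt (grid : List (List String)) (rules : List (String × String)) :
    List (List String) :=
  if grid.length % 2 = 0 then pvBCore grid rules 2
  else if grid.length % 3 = 0 then pvBCore grid rules 3
  else grid

-- ===== PRECONDITION & SPEC =====

-- the pattern of block (x, y): "/".join of the joined row slices
def pvPatt (grid : List (List String)) (s x y : Nat) : String :=
  PySem.Str.join "/" (((grid.drop (y * s)).take s).map (fun row =>
    PySem.Str.join "" ((row.drop (x * s)).take s)))

-- rows at least size long (shorter: A raises IndexError), and for every block its pattern is a
-- key of rules (missing: KeyError) whose replacement splits into lines of which each of the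
-- first sqsz+1 has exactly sqsz+1 characters (fewer lines / short lines: A raises IndexError;
-- longer lines: A silently truncates while B keeps every character of the line — excluded as
-- a malformed-rule corner, see the claim's cite).
def pvGoodRules (grid : List (List String)) (rules : List (String × String)) (s : Nat) : Prop :=
  (∀ row ∈ grid, grid.length ≤ row.length) ∧
  ∀ x < grid.length / s, ∀ y < grid.length / s, ∀ r < s + 1,
    (((PySem.Str.split? ((pvLookup rules (pvPatt grid s x y)).getD "") "/").getD []).getD r "").toList.length = s + 1

-- Pre_ excludes exactly the inputs where A raises (ragged/short rows, missing rule keys,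
-- replacements with too few lines or lines shorter than sqsz+1) plus the malformed-rule corner
-- where a replacement line is LONGER than sqsz+1 (A silently truncates it, B does not).
def Pre_fractal_iteration (grid : List (List String)) (rules : List (String × String)) : Prop :=
  if grid.length % 2 = 0 then pvGoodRules grid rules 2
  else if grid.length % 3 = 0 then pvGoodRules grid rules 3
  else True

instance (grid : List (List String)) (rules : List (String × String)) :
    Decidable (Pre_fractal_iteration grid rules) := by
  unfold Pre_fractal_iteration pvGoodRules; infer_instance

def pvWitness_fractal_iteration : List (List String) × (List (String × String)) :=
  ([[".", "."], [".", "#"]], [("../.#", "##./#../...")])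

def Spec_fractal_iteration (grid : List (List String)) (rules : List (String × String))
    (out : List (List String)) : Prop := out = fractal_iteration_alt grid rules
instance (grid : List (List String)) (rules : List (String × String)) (out : List (List String)) :
    Decidable (Spec_fractal_iteration grid rules out) := by
  unfold Spec_fractal_iteration; infer_instance

-- ===== CLAIM (what is proved, stated in full; the proofs are below) =====
def Claim_equal_fractal_iteration : Prop := ∀ (grid : List (List String)) (rules : List (String × String)), Dom_fractal_iteration grid rules → Pre_fractal_iteration grid rules → Spec_fractal_iteration grid rules (fractal_iteration grid rules)

-- ===== LEMMAS AND PROOFS =====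

theorem pvWitness_ok :
    Dom_fractal_iteration pvWitness_fractal_iteration.1 pvWitness_fractal_iteration.2 ∧
    Pre_fractal_iteration pvWitness_fractal_iteration.1 pvWitness_fractal_iteration.2 := by
  constructor <;> decide

-- ---- cells of a grid, scatter writes ----

def pvCell (g : List (List String)) (i j : Nat) : Option String := (g[i]?.getD [])[j]?

def pvApplyW (g : List (List String)) (W : List ((Nat × Nat) × String)) : List (List String) :=
  W.foldl (fun g w => pvSetCell g w.1.1 w.1.2 w.2) g

theorem len_setCell (g : List (List String)) (i j : Nat) (v : String) :
    (pvSetCell g i j v).length = g.length := by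
  simp [pvSetCell]

theorem row_setCell (g : List (List String)) (i j : Nat) (v : String) (i' : Nat) :
    ((pvSetCell g i j v)[i']?.getD []).length = (g[i']?.getD []).length := by
  simp only [pvSetCell, List.getElem?_set, List.getD_eq_getElem?_getD]
  split_ifs with h1 h2
  · subst h1; simp
  · subst h1; rw [List.getElem?_eq_none (by omega)]
  · rfl

theorem cell_setCell_ne (g : List (List String)) (i j : Nat) (v : String) (i' j' : Nat)
    (h : (i', j') ≠ (i, j)) : pvCell (pvSetCell g i j v) i' j' = pvCell g i' j' := by
  simp only [pvCell, pvSetCell, List.getElem?_set, List.getD_eq_getElem?_getD]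
  split_ifs with h1 h2
  · subst h1
    have hj : ¬ j = j' := by rintro rfl; exact h rfl
    simp [hj]
  · subst h1
    rw [List.getElem?_eq_none (show g.length ≤ i by omega)]
  · rfl

theorem cell_setCell_self (g : List (List String)) (i j : Nat) (v : String)
    (hi : i < g.length) (hj : j < (g[i]?.getD []).length) :
    pvCell (pvSetCell g i j v) i j = some v := by
  have hj' : j < (g.getD i []).length := by
    rwa [List.getD_eq_getElem?_getD]
  have hj'' : j < g[i].length := by
    rw [List.getElem?_eq_getElem hi] at hj
    simpa using hj
  simp [pvCell, pvSetCell, List.getElem?_set, hi, hj'']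

theorem len_applyW (g : List (List String)) (W : List ((Nat × Nat) × String)) :
    (pvApplyW g W).length = g.length := by
  induction W generalizing g with
  | nil => rfl
  | cons w W ih => simp [pvApplyW, List.foldl_cons] at ih ⊢; rw [ih, len_setCell]

theorem row_applyW (g : List (List String)) (W : List ((Nat × Nat) × String)) (i : Nat) :
    ((pvApplyW g W)[i]?.getD []).length = (g[i]?.getD []).length := by
  induction W generalizing g with
  | nil => rfl
  | cons w W ih => simp [pvApplyW, List.foldl_cons] at ih ⊢; rw [ih, row_setCell]

theorem cell_applyW_notmem (g : List (List String)) (W : List ((Nat × Nat) × String))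
    (i j : Nat) (h : ∀ w ∈ W, w.1 ≠ (i, j)) :
    pvCell (pvApplyW g W) i j = pvCell g i j := by
  induction W generalizing g with
  | nil => rfl
  | cons w W ih =>
      simp only [pvApplyW, List.foldl_cons] at ih ⊢
      rw [ih _ (fun w hw => h w (List.mem_cons_of_mem _ hw)),
        cell_setCell_ne _ _ _ _ _ _ (by
          have hw := h w (List.mem_cons_self)
          intro hc
          exact hw (by cases w with | mk a b => cases a; simp_all))]

theorem cell_applyW_mem (g : List (List String)) (W : List ((Nat × Nat) × String))
    (i j : Nat) (v : String) (hnd : (W.map Prod.fst).Nodup) (hm : ((i, j), v) ∈ W)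
    (hi : i < g.length) (hj : j < (g[i]?.getD []).length) :
    pvCell (pvApplyW g W) i j = some v := by
  induction W generalizing g with
  | nil => simp at hm
  | cons w W ih =>
      rw [List.map_cons, List.nodup_cons] at hnd
      rcases List.mem_cons.mp hm with rfl | hmem
      · have hpos : ∀ u ∈ W, u.1 ≠ (i, j) := by
          intro u hu hc
          exact hnd.1 (by rw [← hc]; exact List.mem_map.mpr ⟨u, hu, rfl⟩)
        have hnot := cell_applyW_notmem (pvSetCell g i j v) W i j hpos
        show pvCell (pvApplyW (pvSetCell g i j v) W) i j = some v
        rw [hnot, cell_setCell_self g i j v hi hj]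
      · show pvCell (pvApplyW (pvSetCell g w.1.1 w.1.2 w.2) W) i j = some v
        exact ih (pvSetCell g w.1.1 w.1.2 w.2) hnd.2 hmem
          (by rw [len_setCell]; exact hi) (by rw [row_setCell]; exact hj)

-- ---- reconstruction of a grid from its cells ----

theorem grid_eq_of_cells (g : List (List String)) (m k : Nat) (f : Nat → Nat → String)
    (hl : g.length = m) (hr : ∀ i < m, (g[i]?.getD []).length = k)
    (hc : ∀ i j, i < m → j < k → pvCell g i j = some (f i j)) :
    g = (List.range m).map (fun i => (List.range k).map (fun j => f i j)) := by
  apply List.ext_getElem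
  · simp [hl]
  · intro i h1 h2
    have him : i < m := by simpa [hl] using h1
    have hgi : g[i]? = some g[i] := List.getElem?_eq_getElem h1
    rw [List.getElem_map, List.getElem_range]
    apply List.ext_getElem
    · have := hr i him
      rw [hgi] at this
      simpa using this
    · intro j hj1 hj2
      have hjk : j < k := by simpa using hj2
      have hcell := hc i j him hjk
      rw [pvCell, hgi, Option.getD_some, List.getElem?_eq_getElem hj1] at hcell
      simp only [List.getElem_map, List.getElem_range]
      exact Option.some.inj hcell

-- ---- flatMap with uniform piece length ----

theorem length_flatMap_uniform {α β : Type} (l : List α) (F : α → List β) (k : Nat)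
    (h : ∀ a ∈ l, (F a).length = k) : (l.flatMap F).length = l.length * k := by
  induction l with
  | nil => simp
  | cons a t ih =>
      rw [List.flatMap_cons, List.length_append, h a List.mem_cons_self,
        ih (fun b hb => h b (List.mem_cons_of_mem _ hb)), List.length_cons]
      ring

theorem getElem?_flatMap_uniform {α β : Type} (l : List α) (F : α → List β) (k : Nat)
    (h : ∀ a ∈ l, (F a).length = k) (i j : Nat) (hi : i < l.length) (hj : j < k) :
    (l.flatMap F)[i * k + j]? = (F l[i])[j]? := by
  induction l generalizing i with
  | nil => simp at hi
  | cons a t ih =>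
      have ha : (F a).length = k := h a List.mem_cons_self
      rw [List.flatMap_cons]
      cases i with
      | zero =>
          rw [List.getElem?_append, if_pos (by omega)]
          simp
      | succ i =>
          rw [List.getElem?_append_right (by rw [ha, Nat.succ_mul]; omega)]
          have harith : (i + 1) * k + j - (F a).length = i * k + j := by
            rw [ha, Nat.succ_mul]; omega
          rw [harith]
          have hit : i < t.length := by simpa using hi
          rw [ih (fun b hb => h b (List.mem_cons_of_mem _ hb)) i hit]
          simp

-- ---- small arithmetic helper ----

theorem pv_mul_add_inj {n a a' b b' : Nat} (hb : b < n) (hb' : b' < n)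
    (h : a * n + b = a' * n + b') : a = a' ∧ b = b' := by
  have h1 : (a * n + b) / n = a := by
    rw [Nat.mul_comm a n, Nat.mul_add_div (by omega), Nat.div_eq_of_lt hb]
    omega
  have h2 : (a' * n + b') / n = a' := by
    rw [Nat.mul_comm a' n, Nat.mul_add_div (by omega), Nat.div_eq_of_lt hb']
    omega
  have ha : a = a' := by rw [← h1, ← h2, h]
  subst ha
  exact ⟨rfl, by omega⟩

-- ---- membership / nodup of pvProduct2 ----

theorem mem_pvProduct2 {k : Nat} {p : Nat × Nat} : p ∈ pvProduct2 k ↔ p.1 < k ∧ p.2 < k := by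
  cases p; simp [pvProduct2]

theorem pvProduct2_eq_product (k : Nat) :
    pvProduct2 k = (List.range k) ×ˢ (List.range k) := rfl

theorem nodup_pvProduct2 (k : Nat) : (pvProduct2 k).Nodup := by
  rw [pvProduct2_eq_product]
  exact List.nodup_range.product List.nodup_range

-- ---- A-side canonical form ----

def pvSquare (grid : List (List String)) (s x y : Nat) : List (List String) :=
  (List.range s).map (fun yy => (List.range s).map (fun xx =>
    (grid.getD (y * s + yy) []).getD (x * s + xx) ""))

def pvNewSq (grid : List (List String)) (rules : List (String × String)) (s x y : Nat) :
    List (List String) :=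
  pattern_to_grid ((pvLookup rules (grid_to_pattern (pvSquare grid s x y))).getD "")

def pvValA (grid : List (List String)) (rules : List (String × String)) (s i j : Nat) : String :=
  ((pvNewSq grid rules s (j / (s + 1)) (i / (s + 1))).getD (i % (s + 1)) []).getD (j % (s + 1)) ""

theorem nodup_flatMap_map {α β γ : Type} (l : List α) (m : List β) (f : α → β → γ)
    (hl : l.Nodup) (hm : m.Nodup)
    (hinj : ∀ a ∈ l, ∀ b ∈ m, ∀ a' ∈ l, ∀ b' ∈ m, f a b = f a' b' → a = a' ∧ b = b') :
    (l.flatMap (fun a => m.map (f a))).Nodup := by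
  induction l with
  | nil => simp
  | cons a t ih =>
      rw [List.flatMap_cons]
      rw [List.nodup_cons] at hl
      refine List.Nodup.append ?_ ?_ ?_
      · exact List.Nodup.map_on
          (fun b hb b' hb' h =>
            (hinj a List.mem_cons_self b hb a List.mem_cons_self b' hb' h).2) hm
      · exact ih hl.2 (fun a1 ha1 b hb a2 ha2 b' hb' h =>
          hinj a1 (List.mem_cons_of_mem _ ha1) b hb a2 (List.mem_cons_of_mem _ ha2) b' hb' h)
      · intro z hz1 hz2
        obtain ⟨b, hb, rfl⟩ := List.mem_map.mp hz1
        obtain ⟨a', ha', hz2'⟩ := List.mem_flatMap.mp hz2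
        obtain ⟨b', hb', heq⟩ := List.mem_map.mp hz2'
        have hab := hinj a' (List.mem_cons_of_mem _ ha') b' hb' a List.mem_cons_self b hb heq
        exact hl.1 (hab.1 ▸ ha')

-- the write list of block xy in A's filling loop
def pvW (grid : List (List String)) (rules : List (String × String)) (s : Nat)
    (xy : Nat × Nat) : List ((Nat × Nat) × String) :=
  (pvProduct2 (s + 1)).map (fun p => ((xy.2 * (s + 1) + p.2, xy.1 * (s + 1) + p.1),
    ((pvNewSq grid rules s xy.1 xy.2).getD p.2 []).getD p.1 ""))

theorem squareFold_eq (grid : List (List String)) (s x y : Nat) :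
    (pvProduct2 s).foldl (fun sq p =>
        pvSetCell sq p.2 p.1 ((grid.getD (y * s + p.2) []).getD (x * s + p.1) ""))
      (List.replicate s (List.replicate s "")) = pvSquare grid s x y := by
  have hfold :
      (pvProduct2 s).foldl (fun sq p =>
          pvSetCell sq p.2 p.1 ((grid.getD (y * s + p.2) []).getD (x * s + p.1) ""))
        (List.replicate s (List.replicate s "")) =
      pvApplyW (List.replicate s (List.replicate s ""))
        ((pvProduct2 s).map (fun p =>
          ((p.2, p.1), (grid.getD (y * s + p.2) []).getD (x * s + p.1) ""))) := by
    rw [pvApplyW, List.foldl_map]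
  rw [hfold, pvSquare]
  apply grid_eq_of_cells _ s s
  · rw [len_applyW]; simp
  · intro i hi
    rw [row_applyW]
    simp [List.getElem?_replicate, hi]
  · intro i j hi hj
    apply cell_applyW_mem
    · rw [List.map_map]
      have hmapeq : (Prod.fst ∘ fun p : Nat × Nat =>
          ((p.2, p.1), (grid.getD (y * s + p.2) []).getD (x * s + p.1) "")) =
          (fun p : Nat × Nat => (p.2, p.1)) := rfl
      rw [hmapeq]
      refine List.Nodup.map_on ?_ (nodup_pvProduct2 s)
      intro p _ q _ h
      have h2 : p.2 = q.2 := congrArg Prod.fst h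
      have h1 : p.1 = q.1 := congrArg Prod.snd h
      cases p; cases q; simp_all
    · exact List.mem_map.mpr ⟨(j, i), mem_pvProduct2.mpr ⟨hj, hi⟩, rfl⟩
    · simp [hi]
    · simp [List.getElem?_replicate, hi, hj]

theorem aCore_eq (grid : List (List String)) (rules : List (String × String)) (s : Nat)
    (hs : 0 < s) :
    pvACore grid rules s =
      (List.range (grid.length / s * (s + 1))).map (fun i =>
        (List.range (grid.length / s * (s + 1))).map (fun j => pvValA grid rules s i j)) := by
  simp only [pvACore]
  refine (PySem.List.foldl_congr_mem _ _
    (fun acc xy => pvApplyW acc (pvW grid rules s xy)) _ ?_).trans ?_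
  · intro acc xy hxy
    simp only [pvW, pvApplyW, List.foldl_map, squareFold_eq, pvNewSq]
  · simp only [pvApplyW]
    rw [← List.foldl_flatMap]
    show pvApplyW _ ((pvProduct2 (grid.length / s)).flatMap (fun xy => pvW grid rules s xy)) = _
    apply grid_eq_of_cells _ _ _
    · rw [len_applyW]; simp
    · intro i hi
      rw [row_applyW]
      simp [List.getElem?_replicate, hi]
    · intro i j hi hj
      have hns : 0 < s + 1 := Nat.succ_pos s
      apply cell_applyW_mem
      · have hpos : ((pvProduct2 (grid.length / s)).flatMap
            (fun xy => pvW grid rules s xy)).map Prod.fst =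
            (pvProduct2 (grid.length / s)).flatMap (fun q =>
              (pvProduct2 (s + 1)).map (fun p =>
                (q.2 * (s + 1) + p.2, q.1 * (s + 1) + p.1))) := by
          simp [pvW, List.map_flatMap, List.map_map, Function.comp_def]
        rw [hpos]
        apply nodup_flatMap_map _ _ _ (nodup_pvProduct2 _) (nodup_pvProduct2 _)
        intro q hq p hp q' hq' p' hp' h
        have h1 : q.2 * (s + 1) + p.2 = q'.2 * (s + 1) + p'.2 := congrArg Prod.fst h
        have h2 : q.1 * (s + 1) + p.1 = q'.1 * (s + 1) + p'.1 := congrArg Prod.snd h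
        obtain ⟨hq2, hp2⟩ := pv_mul_add_inj (mem_pvProduct2.mp hp).2 (mem_pvProduct2.mp hp').2 h1
        obtain ⟨hq1, hp1⟩ := pv_mul_add_inj (mem_pvProduct2.mp hp).1 (mem_pvProduct2.mp hp').1 h2
        cases q; cases q'; cases p; cases p'; simp_all
      · refine List.mem_flatMap.mpr ⟨(j / (s + 1), i / (s + 1)), ?_, ?_⟩
        · exact mem_pvProduct2.mpr ⟨(Nat.div_lt_iff_lt_mul hns).mpr hj,
            (Nat.div_lt_iff_lt_mul hns).mpr hi⟩
        · refine List.mem_map.mpr ⟨(j % (s + 1), i % (s + 1)), ?_, ?_⟩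
          · exact mem_pvProduct2.mpr ⟨Nat.mod_lt _ hns, Nat.mod_lt _ hns⟩
          · refine congrArg₂ Prod.mk ?_ rfl
            exact congrArg₂ Prod.mk (Nat.div_add_mod' i (s+1)) (Nat.div_add_mod' j (s+1))
      · simp [hi]
      · simp [List.getElem?_replicate, hi, hj]

-- ---- B-side canonical form ----

def pvBlk (grid : List (List String)) (rules : List (String × String)) (s bx by_ : Nat) :
    List String :=
  (PySem.Str.split? ((pvLookup rules (pvPatt grid s bx by_)).getD "") "/").getD []

def pvChars (grid : List (List String)) (rules : List (String × String)) (s bx by_ r : Nat) :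
    List String :=
  ((pvBlk grid rules s bx by_).getD r "").toList.map (fun c => String.ofList [c])

theorem bCore_eq (grid : List (List String)) (rules : List (String × String)) (s : Nat) :
    pvBCore grid rules s =
      (List.range (grid.length / s)).flatMap (fun by_ =>
        (List.range (s + 1)).map (fun r =>
          (List.range (grid.length / s)).flatMap (fun bx => pvChars grid rules s bx by_ r))) := by
  simp only [pvBCore]
  refine (PySem.List.foldl_congr_mem _ _
    (fun acc by_ => acc ++ (List.range (s + 1)).map (fun r =>
      (List.range (grid.length / s)).flatMap (fun bx => pvChars grid rules s bx by_ r)))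
    _ ?_).trans ?_
  · intro acc by_ hby
    rw [PySem.List.foldl_append_singleton_eq_map]
    congr 1
    apply List.map_congr_left
    intro r hr
    rw [List.flatMap_map]
    simp only [pvChars, pvBlk, pvPatt]
  · rw [PySem.List.foldl_append_eq_flatMap]
    rw [List.nil_append]

-- ---- slices as maps of indexed reads ----

theorem drop_take_eq_map_range {α : Type} (xs : List α) (a k : Nat) (d : α)
    (h : a + k ≤ xs.length) :
    (xs.drop a).take k = (List.range k).map (fun t => xs.getD (a + t) d) := by
  apply List.ext_getElem
  · simp; omega
  · intro t h1 h2
    rw [List.getElem_map, List.getElem_range, List.getElem_take, List.getElem_drop,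
      List.getD_eq_getElem?_getD, List.getElem?_eq_getElem (by
        simp at h1; omega)]
    rfl

-- ---- the two block patterns coincide ----

theorem patt_eq (grid : List (List String)) (s x y : Nat) (hs : 0 < s)
    (hrows : ∀ row ∈ grid, grid.length ≤ row.length)
    (hx : x < grid.length / s) (hy : y < grid.length / s) :
    grid_to_pattern (pvSquare grid s x y) = pvPatt grid s x y := by
  have hn : grid.length / s * s ≤ grid.length := Nat.div_mul_le_self _ _
  have hyb : y * s + s ≤ grid.length := by
    have h1 : (y + 1) * s ≤ grid.length / s * s := Nat.mul_le_mul_right _ (by omega)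
    rw [Nat.succ_mul] at h1
    omega
  simp only [grid_to_pattern, pvPatt, pvSquare]
  congr 1
  rw [drop_take_eq_map_range grid (y * s) s [] hyb, List.map_map, List.map_map]
  apply List.map_congr_left
  intro yy hyy
  have hyy' : yy < s := List.mem_range.mp hyy
  simp only [Function.comp]
  congr 1
  have hmem : grid.getD (y * s + yy) [] ∈ grid := by
    rw [List.getD_eq_getElem?_getD, List.getElem?_eq_getElem (by omega)]
    exact List.getElem_mem _
  have hxb : x * s + s ≤ (grid.getD (y * s + yy) []).length := by
    have h1 : (x + 1) * s ≤ grid.length / s * s := Nat.mul_le_mul_right _ (by omega)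
    rw [Nat.succ_mul] at h1
    have := hrows _ hmem
    omega
  rw [drop_take_eq_map_range (grid.getD (y * s + yy) []) (x * s) s "" hxb]

-- ---- per-row equality ----

theorem row_eq (grid : List (List String)) (rules : List (String × String)) (s : Nat)
    (hs : 0 < s) (hgood : pvGoodRules grid rules s) (i : Nat)
    (hi : i < grid.length / s * (s + 1)) :
    (List.range (grid.length / s * (s + 1))).map (fun j => pvValA grid rules s i j) =
      (List.range (grid.length / s)).flatMap (fun bx =>
        pvChars grid rules s bx (i / (s + 1)) (i % (s + 1))) := by
  obtain ⟨hrows, hrule⟩ := hgood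
  have hns : 0 < s + 1 := Nat.succ_pos s
  have hy : i / (s + 1) < grid.length / s := (Nat.div_lt_iff_lt_mul hns).mpr hi
  have hr : i % (s + 1) < s + 1 := Nat.mod_lt _ hns
  have hlenc : ∀ bx ∈ List.range (grid.length / s),
      (pvChars grid rules s bx (i / (s + 1)) (i % (s + 1))).length = s + 1 := by
    intro bx hbx
    have hbx' : bx < grid.length / s := List.mem_range.mp hbx
    have := hrule bx hbx' (i / (s + 1)) hy (i % (s + 1)) hr
    simpa [pvChars, pvBlk] using this
  apply List.ext_getElem
  · rw [List.length_map, List.length_range,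
      length_flatMap_uniform _ _ (s + 1) hlenc, List.length_range]
  · intro j h1 h2
    have hj : j < grid.length / s * (s + 1) := by simpa using h1
    have hxb : j / (s + 1) < grid.length / s := (Nat.div_lt_iff_lt_mul hns).mpr hj
    have hcb : j % (s + 1) < s + 1 := Nat.mod_lt _ hns
    have hflat := getElem?_flatMap_uniform (List.range (grid.length / s)) _ (s + 1) hlenc
      (j / (s + 1)) (j % (s + 1)) (by simpa using hxb) hcb
    simp only [List.getElem_range] at hflat
    rw [Nat.div_add_mod'] at hflat
    apply Option.some.inj
    rw [← List.getElem?_eq_getElem h1, ← List.getElem?_eq_getElem h2, hflat,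
      List.getElem?_map, List.getElem?_range hj, Option.map_some]
    -- value computation at block (x, y) = (j/(s+1), i/(s+1)), row r = i%(s+1), col c = j%(s+1)
    have hlen_r : ((pvBlk grid rules s (j / (s + 1)) (i / (s + 1))).getD (i % (s + 1)) "").toList.length
        = s + 1 := by
      simpa [pvBlk] using hrule (j / (s + 1)) hxb (i / (s + 1)) hy (i % (s + 1)) hr
    have hrL : i % (s + 1) < (pvBlk grid rules s (j / (s + 1)) (i / (s + 1))).length := by
      by_contra hge
      push_neg at hge
      rw [List.getD_eq_default _ _ hge] at hlen_r
      simp at hlen_r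
    have hLr : (pvBlk grid rules s (j / (s + 1)) (i / (s + 1))).getD (i % (s + 1)) ""
        = (pvBlk grid rules s (j / (s + 1)) (i / (s + 1)))[i % (s + 1)] := by
      rw [List.getD_eq_getElem?_getD, List.getElem?_eq_getElem hrL]
      rfl
    have hclen : j % (s + 1) <
        ((pvBlk grid rules s (j / (s + 1)) (i / (s + 1)))[i % (s + 1)]).toList.length := by
      rw [← hLr, hlen_r]
      exact hcb
    set L := pvBlk grid rules s (j / (s + 1)) (i / (s + 1)) with hLdef
    have hfold : pattern_to_grid ((pvLookup rules (pvPatt grid s (j / (s + 1)) (i / (s + 1)))).getD "")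
        = L.map (fun line => line.toList.map (fun c => String.ofList [c])) := by
      rw [hLdef]
      simp only [pattern_to_grid, pvBlk]
    have hrowA : (L.map (fun line => line.toList.map (fun c => String.ofList [c]))).getD (i % (s + 1)) []
        = (L[i % (s + 1)]).toList.map (fun c => String.ofList [c]) := by
      rw [List.getD_eq_getElem?_getD, List.getElem?_map, List.getElem?_eq_getElem hrL]
      rfl
    have hcellA : ((L[i % (s + 1)]).toList.map (fun c => String.ofList [c])).getD (j % (s + 1)) ""
        = String.ofList [(L[i % (s + 1)]).toList[j % (s + 1)]] := by
      rw [List.getD_eq_getElem?_getD, List.getElem?_map, List.getElem?_eq_getElem hclen]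
      rfl
    have hcellB : ((L.getD (i % (s + 1)) "").toList.map (fun c => String.ofList [c]))[j % (s + 1)]?
        = some (String.ofList [(L[i % (s + 1)]).toList[j % (s + 1)]]) := by
      rw [hLr, List.getElem?_map, List.getElem?_eq_getElem hclen]
      rfl
    simp only [pvValA, pvNewSq, patt_eq grid s (j / (s + 1)) (i / (s + 1)) hs hrows hxb hy,
      hfold, pvChars, ← hLdef, hrowA, hcellA, hcellB]

theorem core_eq (grid : List (List String)) (rules : List (String × String)) (s : Nat)
    (hs : 0 < s) (hgood : pvGoodRules grid rules s) :
    pvACore grid rules s = pvBCore grid rules s := by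
  rw [aCore_eq grid rules s hs, bCore_eq]
  have hns : 0 < s + 1 := Nat.succ_pos s
  have hband : ∀ b ∈ List.range (grid.length / s),
      ((List.range (s + 1)).map (fun r =>
        (List.range (grid.length / s)).flatMap (fun bx => pvChars grid rules s bx b r))).length
      = s + 1 := by
    intro b _
    simp
  apply List.ext_getElem
  · rw [List.length_map, List.length_range,
      length_flatMap_uniform _ _ (s + 1) hband, List.length_range]
  · intro i h1 h2
    have hi : i < grid.length / s * (s + 1) := by simpa using h1
    have hyb : i / (s + 1) < grid.length / s := (Nat.div_lt_iff_lt_mul hns).mpr hi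
    have hflat := getElem?_flatMap_uniform (List.range (grid.length / s)) _ (s + 1) hband
      (i / (s + 1)) (i % (s + 1)) (by simpa using hyb) (Nat.mod_lt _ hns)
    simp only [List.getElem_range] at hflat
    rw [Nat.div_add_mod'] at hflat
    apply Option.some.inj
    rw [← List.getElem?_eq_getElem h1, ← List.getElem?_eq_getElem h2, hflat,
      List.getElem?_map, List.getElem?_range hi, Option.map_some,
      List.getElem?_map, List.getElem?_range (Nat.mod_lt i hns), Option.map_some]
    exact congrArg some (row_eq grid rules s hs hgood i hi)

-- ===== VERDICT (by name: the statement is the Claim_ definition above) =====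
theorem fractal_iteration_spec : Claim_equal_fractal_iteration := by
  intro grid rules _hdom hpre
  unfold Spec_fractal_iteration fractal_iteration fractal_iteration_alt
  unfold Pre_fractal_iteration at hpre
  split_ifs with h2 h3
  · simp only [h2, if_pos] at hpre
    exact core_eq grid rules 2 (by omega) hpre
  · simp only [h2, h3, if_pos] at hpre
    exact core_eq grid rules 3 (by omega) (by simpa using hpre)
  · rfl
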